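-- pv_equiv track=rewrite | github.com/vinchinzu/euler | python/437.py | has_fibonacci_primitive_root
-- ===== SOURCE A (Python) =====
-- def sq_mod(n: int, mod: int) -> int:
--     """Return n squared modulo mod."""
--     return (n * n) % mod
--
-- def fibonacci_mod(n: int, mod: int) -> int:
--     """Compute nth Fibonacci number modulo mod."""
--     if n == 0:
--         return 0
--     if n == 1:
--         return 1
--
--     def mat_mult(
--         a: list[list[int]], b: list[list[int]]
--     ) -> list[list[int]]:
--         return [
--             [
--                 (a[0][0] * b[0][0] + a[0][1] * b[1][0]) % mod,
--                 (a[0][0] * b[0][1] + a[0][1] * b[1][1]) % mod,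
--             ],
--             [
--                 (a[1][0] * b[0][0] + a[1][1] * b[1][0]) % mod,
--                 (a[1][0] * b[0][1] + a[1][1] * b[1][1]) % mod,
--             ],
--         ]
--
--     def mat_pow(mat: list[list[int]], exp: int) -> list[list[int]]:
--         result = [[1, 0], [0, 1]]
--         base = mat
--         while exp:
--             if exp & 1:
--                 result = mat_mult(result, base)
--             base = mat_mult(base, base)
--             exp >>= 1
--         return result
--
--     fib_mat = [[1, 1], [1, 0]]
--     result_mat = mat_pow(fib_mat, n - 1)
--     return result_mat[0][0]
--
-- def prime_factors(n: int) -> set[int]: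
--     """Get prime factors of n."""
--     factors = set()
--     d = 2
--     while d * d <= n:
--         while n % d == 0:
--             factors.add(d)
--             n //= d
--         d += 1
--     if n > 1:
--         factors.add(n)
--     return factors
--
-- def has_fibonacci_primitive_root(p: int) -> bool:
--     """Check if prime p has a Fibonacci primitive root."""
--     if sq_mod(p, 5) == 4:
--         return False
--     if p == 5:
--         return True
--
--     factors = prime_factors(p - 1)
--     for d in factors:
--         fib_val = fibonacci_mod((p - 1) // d, p)
--         fib_next = fibonacci_mod((p - 1) // d + 1, p)
--         if fib_val == 0 and fib_next == 1:
--             return False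
--     return True
-- ===== SOURCE B (Python) =====
-- def _fib_pair(n: int, p: int) -> tuple[int, int]:
--     """Return (F(n) % p, F(n+1) % p) by fast doubling."""
--     if n == 0:
--         return (0, 1 % p)
--     a, b = _fib_pair(n >> 1, p)
--     c = a * (2 * b - a) % p
--     d = (a * a + b * b) % p
--     if n & 1:
--         return (d, (c + d) % p)
--     return (c, d)
--
-- def has_fibonacci_primitive_root(p: int) -> bool:
--     """Check if prime p has a Fibonacci primitive root."""
--     if (p * p) % 5 == 4:
--         return False
--     if p == 5:
--         return True
--     n = p - 1
--     factors = set()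
--     d = 2
--     while d * d <= n:
--         if n % d == 0:
--             factors.add(d)
--             while n % d == 0:
--                 n //= d
--         d += 1
--     if n > 1:
--         factors.add(n)
--     for d in factors:
--         fib_val, fib_next = _fib_pair((p - 1) // d, p)
--         if fib_val == 0 and fib_next == 1:
--             return False
--     return True
-- ===== Notes on version B (the rewrite author's own statement) =====
-- stated objective: alternative
-- what changed: fibonacci_mod's 2x2 matrix exponentiation is replaced by fast-doubling recursion on the bits of n maintaining the pair (F(k) mod p, F(k+1) mod p), so one call yields both F((p-1)//d) and its successor; the factor loop marks each prime once instead of once per multiplicity.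
import Mathlib
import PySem

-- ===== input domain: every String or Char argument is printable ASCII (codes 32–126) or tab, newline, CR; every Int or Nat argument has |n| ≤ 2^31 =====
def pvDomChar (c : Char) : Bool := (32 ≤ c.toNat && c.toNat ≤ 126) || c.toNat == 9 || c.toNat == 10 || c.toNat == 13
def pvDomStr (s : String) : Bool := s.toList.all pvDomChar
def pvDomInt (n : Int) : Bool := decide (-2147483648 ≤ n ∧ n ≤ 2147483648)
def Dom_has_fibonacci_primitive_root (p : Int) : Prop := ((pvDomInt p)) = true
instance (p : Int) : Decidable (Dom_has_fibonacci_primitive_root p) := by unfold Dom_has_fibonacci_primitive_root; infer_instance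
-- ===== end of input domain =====

-- B replaces A's 2x2-matrix exponentiation with fast-doubling recursion on the bits of n that
-- returns the pair (F(k) mod p, F(k+1) mod p) in one call (alternative decomposition, same cost).

-- ===== PORT A =====
-- 2x2 matrices are flat tuples (a00, a01, a10, a11); Python's list-of-lists indexing a[i][j] is
-- always in range here, so the tuple components are exactly those entries.
def sq_mod (n : Int) (mod : Int) : Int := PySem.Int.mod (n * n) mod

def mat_mult (mod : Int) (a b : Int × Int × Int × Int) : Int × Int × Int × Int :=
  (PySem.Int.mod (a.1 * b.1 + a.2.1 * b.2.2.1) mod,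
   PySem.Int.mod (a.1 * b.2.1 + a.2.1 * b.2.2.2) mod,
   PySem.Int.mod (a.2.2.1 * b.1 + a.2.2.2 * b.2.2.1) mod,
   PySem.Int.mod (a.2.2.1 * b.2.1 + a.2.2.2 * b.2.2.2) mod)

-- the 'while exp:' loop of mat_pow; exp is a Nat (every call below passes n - 1 with n ≥ 2,
-- where the Python int loop coincides with this Nat recursion; Python diverges for exp < 0)
def mat_pow_loop (mod : Int) (result base : Int × Int × Int × Int) (exp : Nat) :
    Int × Int × Int × Int :=
  if h : exp = 0 then result
  else mat_pow_loop mod (if exp % 2 = 1 then mat_mult mod result base else result)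
        (mat_mult mod base base) (exp / 2)
termination_by exp
decreasing_by exact Nat.div_lt_self (Nat.pos_of_ne_zero h) one_lt_two

def fibonacci_mod (n : Int) (mod : Int) : Int :=
  if n = 0 then 0
  else if n = 1 then 1
  else (mat_pow_loop mod (1, 0, 0, 1) (1, 1, 1, 0) (n - 1).toNat).1

-- inner 'while n % d == 0' of prime_factors; the fuel n.natAbs + 1 supplied at the call site
-- exceeds the true iteration count whenever the Python loop terminates
def pf_inner (fuel : Nat) (d : Int) (n : Int) (factors : PySem.Set Int) :
    Int × PySem.Set Int :=
  match fuel with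
  | 0 => (n, factors)
  | f + 1 =>
    if PySem.Int.mod n d = 0 then pf_inner f d (PySem.Int.floordiv n d) (PySem.Set.add factors d)
    else (n, factors)

-- outer 'while d * d <= n' of prime_factors; the fuel n.natAbs + 2 exceeds d's range sqrt(n)
def pf_outer (fuel : Nat) (d : Int) (n : Int) (factors : PySem.Set Int) :
    Int × PySem.Set Int :=
  match fuel with
  | 0 => (n, factors)
  | f + 1 =>
    if d * d ≤ n then
      let r := pf_inner (n.natAbs + 1) d n factors
      pf_outer f (d + 1) r.1 r.2
    else (n, factors)

def prime_factors (n : Int) : PySem.Set Int :=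
  let r := pf_outer (n.natAbs + 2) 2 n PySem.Set.empty
  if r.1 > 1 then PySem.Set.add r.2 r.1 else r.2

-- 'for d in factors: … return False … / return True': the result is whether SOME factor passes
-- the test, which does not depend on the (unmodelled) hash iteration order of the Python set
def check_loop (p : Int) : List Int → Bool
  | [] => true
  | d :: rest =>
    let fib_val := fibonacci_mod (PySem.Int.floordiv (p - 1) d) p
    let fib_next := fibonacci_mod (PySem.Int.floordiv (p - 1) d + 1) p
    if fib_val = 0 ∧ fib_next = 1 then false else check_loop p rest

def has_fibonacci_primitive_root (p : Int) : Bool :=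
  if sq_mod p 5 = 4 then false
  else if p = 5 then true
  else check_loop p (prime_factors (p - 1))

-- ===== PORT B =====
-- fast doubling: returns (F(n) mod p, F(n+1) mod p); n is a Nat (every call site passes the
-- nonnegative (p-1)//d; Python's recursion on n >> 1 diverges for n < 0)
def fib_pair (n : Nat) (p : Int) : Int × Int :=
  if h : n = 0 then (0, PySem.Int.mod 1 p)
  else
    let ab := fib_pair (n / 2) p
    let a := ab.1
    let b := ab.2
    let c := PySem.Int.mod (a * (2 * b - a)) p
    let d := PySem.Int.mod (a * a + b * b) p
    if n % 2 = 1 then (d, PySem.Int.mod (c + d) p) else (c, d)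
termination_by n
decreasing_by exact Nat.div_lt_self (Nat.pos_of_ne_zero h) one_lt_two

-- 'while n % d == 0: n //= d' (factor d already recorded once); same fuel policy as A's port
def strip_factor (fuel : Nat) (d : Int) (n : Int) : Int :=
  match fuel with
  | 0 => n
  | f + 1 =>
    if PySem.Int.mod n d = 0 then strip_factor f d (PySem.Int.floordiv n d) else n

-- 'while d * d <= n: if n % d == 0: factors.add(d); strip'
def trial_division (fuel : Nat) (d : Int) (n : Int) (factors : PySem.Set Int) :
    Int × PySem.Set Int :=
  match fuel with
  | 0 => (n, factors)
  | f + 1 =>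
    if d * d ≤ n then
      if PySem.Int.mod n d = 0 then
        trial_division f (d + 1) (strip_factor (n.natAbs + 1) d n) (PySem.Set.add factors d)
      else trial_division f (d + 1) n factors
    else (n, factors)

def check_loop_alt (p : Int) : List Int → Bool
  | [] => true
  | d :: rest =>
    let fp := fib_pair (PySem.Int.floordiv (p - 1) d).toNat p
    if fp.1 = 0 ∧ fp.2 = 1 then false else check_loop_alt p rest

def has_fibonacci_primitive_root_alt (p : Int) : Bool :=
  if PySem.Int.mod (p * p) 5 = 4 then false
  else if p = 5 then true
  else
    let r := trial_division ((p - 1).natAbs + 2) 2 (p - 1) PySem.Set.empty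
    let factors := if r.1 > 1 then PySem.Set.add r.2 r.1 else r.2
    check_loop_alt p factors

-- ===== PRECONDITION & SPEC =====
def Spec_has_fibonacci_primitive_root (p : Int) (out : Bool) : Prop := out = has_fibonacci_primitive_root_alt p
instance (p : Int) (out : Bool) : Decidable (Spec_has_fibonacci_primitive_root p out) := by unfold Spec_has_fibonacci_primitive_root; infer_instance

-- ===== CLAIM (what is proved, stated in full; the proofs are below) =====
def Claim_equal_has_fibonacci_primitive_root : Prop := ∀ (p : Int), Dom_has_fibonacci_primitive_root p → Spec_has_fibonacci_primitive_root p (has_fibonacci_primitive_root p)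

-- ===== LEMMAS AND PROOFS =====

-- The two factorisation loops compute the identical (residue, factor-set) pair.
theorem pf_inner_fst (fuel : Nat) (d n : Int) (s : PySem.Set Int) :
    (pf_inner fuel d n s).1 = strip_factor fuel d n := by
  induction fuel generalizing n s with
  | zero => rfl
  | succ f ih => simp only [pf_inner, strip_factor]; split <;> simp [ih]

theorem pf_inner_snd_of_mem (fuel : Nat) (d n : Int) (s : PySem.Set Int) (h : d ∈ s) :
    (pf_inner fuel d n s).2 = s := by
  induction fuel generalizing n with
  | zero => rfl
  | succ f ih =>
    simp only [pf_inner]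
    split
    · rw [PySem.Set.add_of_mem h]; exact ih _
    · rfl

theorem pf_inner_snd (f : Nat) (d n : Int) (s : PySem.Set Int) :
    (pf_inner (f + 1) d n s).2 = if PySem.Int.mod n d = 0 then PySem.Set.add s d else s := by
  simp only [pf_inner]
  split
  · exact pf_inner_snd_of_mem _ _ _ _ (by simp [PySem.Set.mem_add])
  · rfl

theorem pf_outer_eq_trial (fuel : Nat) (d n : Int) (s : PySem.Set Int) :
    pf_outer fuel d n s = trial_division fuel d n s := by
  induction fuel generalizing d n s with
  | zero => rfl
  | succ f ih =>
    simp only [pf_outer, trial_division]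
    split
    · rw [pf_inner_fst, pf_inner_snd]
      split
      · exact ih _ _ _
      · rw [ih]
        congr 1
        cases h : n.natAbs + 1 with
        | zero => omega
        | succ m => simp_all [strip_factor]
    · rfl

-- invariants of the shared trial-division loop shape
theorem strip_factor_bounds (fuel : Nat) (d n : Int) (hd : 2 ≤ d) (hn : 1 ≤ n) :
    1 ≤ strip_factor fuel d n ∧ strip_factor fuel d n ≤ n := by
  induction fuel generalizing n with
  | zero => exact ⟨hn, le_refl n⟩
  | succ f ih =>
    simp only [strip_factor]
    split
    · rename_i h
      rw [PySem.Int.floordiv_eq_ediv_of_pos (by omega)] at *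
      have hdvd : d ∣ n := (PySem.Int.mod_eq_zero_iff_dvd n d).mp h
      have h1 : 1 ≤ n / d := by
        rcases hdvd with ⟨k, rfl⟩
        have hk : 1 ≤ k := by nlinarith
        rw [Int.mul_ediv_cancel_left _ (by omega : d ≠ 0)]
        exact hk
      have h2 : n / d ≤ n := Int.ediv_le_self _ (by omega)
      obtain ⟨a, b⟩ := ih _ h1
      exact ⟨a, le_trans b h2⟩
    · exact ⟨hn, le_refl n⟩

theorem trial_division_inv (fuel : Nat) (d n N : Int) (s : PySem.Set Int)
    (hd : 2 ≤ d) (hn : 1 ≤ n) (hN : n ≤ N) (hs : ∀ x ∈ s, 2 ≤ x ∧ x ≤ N) :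
    1 ≤ (trial_division fuel d n s).1 ∧ (trial_division fuel d n s).1 ≤ N ∧
      ∀ x ∈ (trial_division fuel d n s).2, 2 ≤ x ∧ x ≤ N := by
  induction fuel generalizing d n s with
  | zero => exact ⟨hn, hN, hs⟩
  | succ f ih =>
    simp only [trial_division]
    split
    · rename_i hguard
      have hdn : d ≤ n := by nlinarith
      split
      · obtain ⟨h1, h2⟩ := strip_factor_bounds (n.natAbs + 1) d n hd hn
        refine ih (d + 1) _ _ (by omega) h1 (le_trans h2 hN) ?_
        intro x hx
        rcases (PySem.Set.mem_add _ _ _).mp hx with hx | rfl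
        · exact hs x hx
        · exact ⟨hd, by omega⟩
      · exact ih (d + 1) _ _ (by omega) hn hN hs
    · exact ⟨hn, hN, hs⟩

-- fast doubling computes Fibonacci pairs mod p
theorem fib_pair_eq (p : Int) (hp : 0 < p) (n : Nat) :
    fib_pair n p = ((Nat.fib n : Int) % p, (Nat.fib (n + 1) : Int) % p) := by
  induction n using Nat.strong_induction_on with
  | _ n ih =>
    rw [fib_pair]
    by_cases h0 : n = 0
    · simp [h0, PySem.Int.mod_eq_emod_of_pos hp]
    · simp only [dif_neg h0]
      rw [ih (n / 2) (Nat.div_lt_self (Nat.pos_of_ne_zero h0) one_lt_two)]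
      simp only [PySem.Int.mod_eq_emod_of_pos hp]
      set m := n / 2 with hm
      set A : Int := (Nat.fib m : Int) with hA
      set B : Int := (Nat.fib (m + 1) : Int) with hB
      have hAeq : (A % p) % p = A % p := Int.emod_emod_of_dvd _ dvd_rfl
      have hBeq : (B % p) % p = B % p := Int.emod_emod_of_dvd _ dvd_rfl
      have hc : (A % p * (2 * (B % p) - A % p)) % p = (A * (2 * B - A)) % p :=
        Int.ModEq.mul hAeq (Int.ModEq.sub (Int.ModEq.mul_left 2 hBeq) hAeq)
      have hd : (A % p * (A % p) + B % p * (B % p)) % p = (A * A + B * B) % p :=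
        Int.ModEq.add (Int.ModEq.mul hAeq hAeq) (Int.ModEq.mul hBeq hBeq)
      have hfe : (Nat.fib (2 * m) : Int) = A * (2 * B - A) := by
        have hle : Nat.fib m ≤ 2 * Nat.fib (m + 1) := by
          have := Nat.fib_le_fib_succ (n := m); omega
        rw [Nat.fib_two_mul]; push_cast [hle]; ring
      have hfo : (Nat.fib (2 * m + 1) : Int) = A * A + B * B := by
        rw [Nat.fib_two_mul_add_one]; push_cast; ring
      rcases Nat.even_or_odd n with he | ho
      · have h2 : n % 2 = 0 := Nat.even_iff.mp he
        have hn2 : n = 2 * m := by omega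
        simp only [h2]
        norm_num
        constructor
        · rw [hn2, hfe]; exact hc
        · rw [hn2, hfo]; exact hd
      · have h2 : n % 2 = 1 := Nat.odd_iff.mp ho
        have hn2 : n = 2 * m + 1 := by omega
        simp only [h2]
        norm_num
        constructor
        · rw [hn2, hfo]; exact hd
        · have hsum : (Nat.fib (n + 1) : Int)
              = (Nat.fib (2 * m) : Int) + (Nat.fib (2 * m + 1) : Int) := by
            rw [hn2]
            have h22 : 2 * m + 1 + 1 = (2 * m) + 2 := by ring
            rw [h22, Nat.fib_add_two]; push_cast; ring
          rw [hsum, hfe, hfo]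
          exact Int.ModEq.add hc hd

-- pure 2x2 integer matrices, used only to characterise A's modular matrix power
def mmul (a b : Int × Int × Int × Int) : Int × Int × Int × Int :=
  (a.1 * b.1 + a.2.1 * b.2.2.1, a.1 * b.2.1 + a.2.1 * b.2.2.2,
   a.2.2.1 * b.1 + a.2.2.2 * b.2.2.1, a.2.2.1 * b.2.1 + a.2.2.2 * b.2.2.2)

def mpow (b : Int × Int × Int × Int) : Nat → Int × Int × Int × Int
  | 0 => (1, 0, 0, 1)
  | k + 1 => mmul b (mpow b k)

def mred (m : Int) (a : Int × Int × Int × Int) : Int × Int × Int × Int :=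
  (a.1 % m, a.2.1 % m, a.2.2.1 % m, a.2.2.2 % m)

theorem emod_add_mul2 (m a b c d : Int) :
    (a % m * (b % m) + c % m * (d % m)) % m = (a * b + c * d) % m :=
  Int.ModEq.add
    (Int.ModEq.mul (Int.emod_emod_of_dvd _ dvd_rfl) (Int.emod_emod_of_dvd _ dvd_rfl))
    (Int.ModEq.mul (Int.emod_emod_of_dvd _ dvd_rfl) (Int.emod_emod_of_dvd _ dvd_rfl))

theorem mred_mmul_red (m : Int) (a b : Int × Int × Int × Int) :
    mred m (mmul (mred m a) (mred m b)) = mred m (mmul a b) := by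
  obtain ⟨a1, a2, a3, a4⟩ := a
  obtain ⟨b1, b2, b3, b4⟩ := b
  simp only [mred, mmul, emod_add_mul2]

theorem mat_mult_eq (m : Int) (hm : 0 < m) (a b : Int × Int × Int × Int) :
    mat_mult m a b = mred m (mmul a b) := by
  obtain ⟨a1, a2, a3, a4⟩ := a
  obtain ⟨b1, b2, b3, b4⟩ := b
  simp only [mat_mult, mmul, mred, PySem.Int.mod_eq_emod_of_pos hm]

theorem mred_mred (m : Int) (a : Int × Int × Int × Int) : mred m (mred m a) = mred m a := by
  obtain ⟨a1, a2, a3, a4⟩ := a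
  simp only [mred, Int.emod_emod_of_dvd _ dvd_rfl]

theorem mmul_assoc (a b c : Int × Int × Int × Int) : mmul (mmul a b) c = mmul a (mmul b c) := by
  obtain ⟨a1, a2, a3, a4⟩ := a
  obtain ⟨b1, b2, b3, b4⟩ := b
  obtain ⟨c1, c2, c3, c4⟩ := c
  simp only [mmul, Prod.mk.injEq]
  refine ⟨by ring, by ring, by ring, by ring⟩

theorem mmul_one (a : Int × Int × Int × Int) : mmul a (1, 0, 0, 1) = a := by
  obtain ⟨a1, a2, a3, a4⟩ := a
  simp [mmul]

theorem one_mmul (a : Int × Int × Int × Int) : mmul (1, 0, 0, 1) a = a := by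
  obtain ⟨a1, a2, a3, a4⟩ := a
  simp [mmul]

theorem mpow_one (b : Int × Int × Int × Int) : mpow b 1 = b := by
  simp [mpow, mmul_one]

theorem mred_mpow (m : Int) (b : Int × Int × Int × Int) (k : Nat) :
    mred m (mpow (mred m b) k) = mred m (mpow b k) := by
  induction k with
  | zero => rfl
  | succ k ih =>
    show mred m (mmul (mred m b) (mpow (mred m b) k)) = mred m (mmul b (mpow b k))
    rw [← mred_mmul_red, mred_mred, ih, mred_mmul_red]

theorem mpow_sq (b : Int × Int × Int × Int) (k : Nat) : mpow (mmul b b) k = mpow b (2 * k) := by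
  induction k with
  | zero => rfl
  | succ k ih =>
    show mmul (mmul b b) (mpow (mmul b b) k) = mpow b (2 * k + 2)
    rw [ih]
    show mmul (mmul b b) (mpow b (2 * k)) = mmul b (mmul b (mpow b (2 * k)))
    rw [mmul_assoc]

theorem mat_pow_loop_eq (m : Int) (hm : 0 < m) (e : Nat) (he : 1 ≤ e)
    (r b : Int × Int × Int × Int) :
    mat_pow_loop m r b e = mred m (mmul r (mpow b e)) := by
  induction e using Nat.strong_induction_on generalizing r b with
  | _ e ih =>
    rw [mat_pow_loop]
    rw [dif_neg (by omega : ¬ e = 0)]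
    by_cases h1 : e = 1
    · subst h1
      rw [mat_pow_loop]
      norm_num [mpow_one, mat_mult_eq m hm]
    · have hk : 1 ≤ e / 2 := by omega
      rw [ih (e / 2) (by omega) hk]
      rw [mat_mult_eq m hm b b]
      have hbase : mred m (mpow (mred m (mmul b b)) (e / 2)) = mred m (mpow b (2 * (e / 2))) := by
        rw [mred_mpow, mpow_sq]
      rcases Nat.even_or_odd e with hev | hod
      · have h20 : e % 2 = 0 := Nat.even_iff.mp hev
        have h2 : ¬ e % 2 = 1 := by omega
        rw [if_neg h2]
        calc mred m (mmul r (mpow (mred m (mmul b b)) (e / 2)))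
            = mred m (mmul (mred m r) (mred m (mpow (mred m (mmul b b)) (e / 2)))) :=
              (mred_mmul_red m _ _).symm
          _ = mred m (mmul (mred m r) (mred m (mpow b (2 * (e / 2))))) := by rw [hbase]
          _ = mred m (mmul r (mpow b (2 * (e / 2)))) := mred_mmul_red m _ _
          _ = mred m (mmul r (mpow b e)) := by
              have he2 : 2 * (e / 2) = e := by omega
              rw [he2]
      · have h2 : e % 2 = 1 := Nat.odd_iff.mp hod
        rw [if_pos h2, mat_mult_eq m hm r b]
        calc mred m (mmul (mred m (mmul r b)) (mpow (mred m (mmul b b)) (e / 2)))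
            = mred m (mmul (mred m (mred m (mmul r b)))
                (mred m (mpow (mred m (mmul b b)) (e / 2)))) := (mred_mmul_red m _ _).symm
          _ = mred m (mmul (mred m (mmul r b)) (mred m (mpow b (2 * (e / 2))))) := by
              rw [mred_mred, hbase]
          _ = mred m (mmul (mmul r b) (mpow b (2 * (e / 2)))) := mred_mmul_red m _ _
          _ = mred m (mmul r (mmul b (mpow b (2 * (e / 2))))) := by rw [mmul_assoc]
          _ = mred m (mmul r (mpow b (2 * (e / 2) + 1))) := rfl
          _ = mred m (mmul r (mpow b e)) := by
              have he2 : 2 * (e / 2) + 1 = e := by omega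
              rw [he2]

theorem mpow_fib (k : Nat) :
    mpow (1, 1, 1, 0) (k + 1) =
      ((Nat.fib (k + 2) : Int), (Nat.fib (k + 1) : Int), (Nat.fib (k + 1) : Int),
        (Nat.fib k : Int)) := by
  induction k with
  | zero => simp [mpow, mmul]
  | succ k ih =>
    show mmul (1, 1, 1, 0) (mpow (1, 1, 1, 0) (k + 1)) = _
    rw [ih]
    simp only [mmul, Prod.mk.injEq]
    refine ⟨?_, ?_, ?_, ?_⟩
    · rw [Nat.fib_add_two (n := k + 1)]; push_cast; ring
    · rw [Nat.fib_add_two (n := k)]; push_cast; ring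
    · ring
    · ring

theorem fibonacci_mod_eq (p : Int) (hp : 1 < p) (n : Int) (hn : 1 ≤ n) :
    fibonacci_mod n p = (Nat.fib n.toNat : Int) % p := by
  unfold fibonacci_mod
  rw [if_neg (by omega : ¬ n = 0)]
  by_cases h1 : n = 1
  · subst h1
    norm_num [Int.emod_eq_of_lt (by omega : (0:Int) ≤ 1) hp]
  · rw [if_neg h1]
    have he : 1 ≤ (n - 1).toNat := by omega
    obtain ⟨k, hk⟩ : ∃ k, (n - 1).toNat = k + 1 := ⟨(n - 1).toNat - 1, by omega⟩
    rw [mat_pow_loop_eq p (by omega) _ he, one_mmul, hk, mpow_fib]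
    have h2 : k + 2 = n.toNat := by omega
    rw [h2]
    rfl

-- the two per-factor tests agree, hence so do the two scan loops
theorem check_loop_eq (p : Int) (hp : 3 ≤ p) (l : List Int)
    (hl : ∀ x ∈ l, 2 ≤ x ∧ x ≤ p - 1) : check_loop p l = check_loop_alt p l := by
  induction l with
  | nil => rfl
  | cons d rest ih =>
    obtain ⟨hd2, hdp⟩ := hl d (List.mem_cons_self ..)
    have hk : 1 ≤ PySem.Int.floordiv (p - 1) d := by
      rw [PySem.Int.floordiv_eq_ediv_of_pos (by omega)]
      rw [Int.le_ediv_iff_mul_le (by omega)]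
      omega
    set k := PySem.Int.floordiv (p - 1) d with hkdef
    simp only [check_loop, check_loop_alt]
    rw [fibonacci_mod_eq p (by omega) k hk, fibonacci_mod_eq p (by omega) (k + 1) (by omega),
      fib_pair_eq p (by omega)]
    have hk1 : (k + 1).toNat = k.toNat + 1 := by omega
    rw [hk1]
    split
    · rfl
    · exact ih (fun x hx => hl x (List.mem_cons_of_mem _ hx))

-- ===== VERDICT (by name: the statement is the Claim_ definition above) =====
theorem has_fibonacci_primitive_root_spec : Claim_equal_has_fibonacci_primitive_root := by
  unfold Claim_equal_has_fibonacci_primitive_root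
  intro p _
  unfold Spec_has_fibonacci_primitive_root
  unfold has_fibonacci_primitive_root has_fibonacci_primitive_root_alt
  simp only [sq_mod]
  by_cases h1 : PySem.Int.mod (p * p) 5 = 4
  · rw [if_pos h1, if_pos h1]
  · rw [if_neg h1, if_neg h1]
    by_cases h2 : p = 5
    · rw [if_pos h2, if_pos h2]
    · rw [if_neg h2, if_neg h2]
      unfold prime_factors
      rw [pf_outer_eq_trial]
      simp only [gt_iff_lt]
      by_cases h3 : 3 ≤ p
      · obtain ⟨hr1, hr2, hrs⟩ :=
          trial_division_inv ((p - 1).natAbs + 2) 2 (p - 1) (p - 1) PySem.Set.empty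
            (le_refl 2) (by omega) (le_refl _) (by intro x hx; simp [PySem.Set.empty] at hx)
        apply check_loop_eq p h3
        intro x hx
        split at hx
        · rcases (PySem.Set.mem_add _ _ _).mp hx with hx | rfl
          · exact hrs x hx
          · constructor <;> omega
        · exact hrs x hx
      · -- p ≤ 2 (and p ≠ 5): p - 1 ≤ 1, the trial-division loop exits at once, no factors
        have hstop : trial_division ((p - 1).natAbs + 2) 2 (p - 1) PySem.Set.empty
            = (p - 1, PySem.Set.empty) := by
          show trial_division (_ + 2) 2 (p - 1) PySem.Set.empty = _
          rw [show (p - 1).natAbs + 2 = ((p - 1).natAbs + 1) + 1 from rfl]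
          unfold trial_division
          rw [if_neg (by omega : ¬ (2 : Int) * 2 ≤ p - 1)]
        rw [hstop]
        simp [PySem.Set.empty, show ¬ ((1:Int) < p - 1) by omega, check_loop, check_loop_alt]
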